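-- pv_equiv track=rewrite | github.com/elijasgogu/rule30-structure | analysis/2d/gol_path_numbers.py | path_number
-- ===== SOURCE A (Python) =====
-- def path_number(grid):
--     """Sum of all 9-bit Moore neighbourhood decimal values across the grid."""
--     rows, cols = len(grid), len(grid[0])
--     total = 0
--     for r in range(rows):
--         for c in range(cols):
--             bits = []
--             for dr in (-1, 0, 1):
--                 for dc in (-1, 0, 1):
--                     if 0 <= r + dr < rows and 0 <= c + dc < cols:
--                         bits.append(grid[r + dr][c + dc])
--                     else:
--                         bits.append(0)
--             val = sum(b << (8 - i) for i, b in enumerate(bits))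
--             total += val
--     return total
-- ===== SOURCE B (Python) =====
-- def path_number(grid):
--     """Sum of all 9-bit Moore neighbourhood decimal values across the grid."""
--     rows, cols = len(grid), len(grid[0])
--
--     def edge_weight(i, n, hi, mid, lo):
--         # total weight contributed along one axis: mid for offset 0,
--         # hi when a neighbourhood centred one step later exists, lo one step earlier
--         return mid + (hi if i < n - 1 else 0) + (lo if i > 0 else 0)
--
--     return sum(
--         cell * edge_weight(r, rows, 64, 8, 1) * edge_weight(c, cols, 4, 2, 1)
--         for r, row in enumerate(grid)
--         for c, cell in enumerate(row[:cols])
--     )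
-- ===== Notes on version B (the rewrite author's own statement) =====
-- stated objective: faster
-- what changed: Instead of assembling a 9-bit neighbourhood value per centre cell (9 guarded reads and a bit-shift sum per cell), B sums each cell's total contribution once using separable closed-form row/column edge weights (64/8/1 and 4/2/1 per axis), i.e. a scatter/contribution decomposition with O(1) work per cell.
import Mathlib
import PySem

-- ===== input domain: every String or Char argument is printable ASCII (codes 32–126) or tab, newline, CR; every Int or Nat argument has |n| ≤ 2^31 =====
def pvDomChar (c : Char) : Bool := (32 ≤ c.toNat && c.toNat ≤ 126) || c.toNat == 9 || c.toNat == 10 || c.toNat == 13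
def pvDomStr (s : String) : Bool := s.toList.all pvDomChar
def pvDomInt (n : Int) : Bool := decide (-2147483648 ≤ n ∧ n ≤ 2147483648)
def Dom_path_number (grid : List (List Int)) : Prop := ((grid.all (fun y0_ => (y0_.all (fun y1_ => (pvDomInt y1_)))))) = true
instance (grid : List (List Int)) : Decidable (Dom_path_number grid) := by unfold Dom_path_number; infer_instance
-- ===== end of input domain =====

-- B replaces the per-centre 9-bit gather by a per-cell contribution sum with separable
-- closed-form edge weights (O(1) work per cell instead of a 9-element neighbourhood scan):
-- a constant-factor faster decomposition of the same exact total (measured).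

-- ===== PORT A =====
def path_number (grid : List (List Int)) : Int :=
  let rows : Int := PySem.List.len grid
  let cols : Int := PySem.List.len (PySem.List.pyGetD grid 0 [])
  (PySem.List.pyRange 0 rows 1).foldl (fun total r =>
    (PySem.List.pyRange 0 cols 1).foldl (fun total c =>
      let bits : List Int :=
        ([-1, 0, 1] : List Int).foldl (fun bits dr =>
          ([-1, 0, 1] : List Int).foldl (fun bits dc =>
            if 0 ≤ r + dr ∧ r + dr < rows ∧ 0 ≤ c + dc ∧ c + dc < cols then
              bits ++ [PySem.List.pyGetD (PySem.List.pyGetD grid (r + dr) []) (c + dc) 0]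
            else
              bits ++ [0]) bits) []
      let val : Int := ((PySem.List.enumerate bits 0).map (fun ib => ib.2 <<< (8 - ib.1).toNat)).sum
      total + val) total) 0

-- ===== PORT B =====
def edgeWeight (i n hi mid lo : Int) : Int :=
  mid + (if i < n - 1 then hi else 0) + (if 0 < i then lo else 0)

def path_number_alt (grid : List (List Int)) : Int :=
  let rows : Int := PySem.List.len grid
  let cols : Int := PySem.List.len (PySem.List.pyGetD grid 0 [])
  ((PySem.List.enumerate grid 0).map (fun rrow =>
    ((PySem.List.enumerate (PySem.List.slice rrow.2 none (some cols)) 0).map (fun ccell =>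
      ccell.2 * edgeWeight rrow.1 rows 64 8 1 * edgeWeight ccell.1 cols 4 2 1)).sum)).sum

-- ===== PRECONDITION & SPEC =====
-- Pre_ excludes exactly the inputs where the Python A raises IndexError: the empty grid
-- (len(grid[0])) and ragged grids with a row shorter than the first row (grid[r][c] out of range).
def Pre_path_number (grid : List (List Int)) : Prop :=
  grid ≠ [] ∧ ∀ row ∈ grid, (grid.headD []).length ≤ row.length
instance (grid : List (List Int)) : Decidable (Pre_path_number grid) := by
  unfold Pre_path_number; infer_instance
def pvWitness_path_number : List (List Int) := [[1, 0], [0, 1], [1, 1]]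

def Spec_path_number (grid : List (List Int)) (out : Int) : Prop := out = path_number_alt grid
instance (grid : List (List Int)) (out : Int) : Decidable (Spec_path_number grid out) := by
  unfold Spec_path_number; infer_instance

-- ===== CLAIM (what is proved, stated in full; the proofs are below) =====
def Claim_equal_path_number : Prop := ∀ (grid : List (List Int)), Dom_path_number grid → Pre_path_number grid → Spec_path_number grid (path_number grid)

-- ===== LEMMAS AND PROOFS =====

-- the grid read as a total function ℤ × ℤ → ℤ, zero outside the rows × cols rectangle
def pvF (grid : List (List Int)) (x y : Int) : Int :=
  if 0 ≤ x ∧ x < (grid.length : Int) ∧ 0 ≤ y ∧ y < ((grid.headD []).length : Int) then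
    (grid.getD x.toNat []).getD y.toNat 0
  else 0

def ssum (f : ℕ → ℤ) (n : ℕ) : ℤ := ((List.range n).map f).sum

theorem ssum_zero (f : ℕ → ℤ) : ssum f 0 = 0 := rfl

theorem ssum_succ (f : ℕ → ℤ) (n : ℕ) : ssum f (n + 1) = ssum f n + f n := by
  simp [ssum, List.range_succ]

theorem ssum_succ' (f : ℕ → ℤ) (n : ℕ) :
    ssum f (n + 1) = f 0 + ssum (fun i => f (i + 1)) n := by
  simp [ssum, List.range_succ_eq_map, List.map_map, Function.comp_def]

theorem ssum_congr {f g : ℕ → ℤ} {n : ℕ} (h : ∀ i < n, f i = g i) : ssum f n = ssum g n := by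
  unfold ssum
  congr 1
  exact List.map_congr_left (fun i hi => h i (List.mem_range.mp hi))

theorem ssum_add (f g : ℕ → ℤ) (n : ℕ) :
    ssum (fun i => f i + g i) n = ssum f n + ssum g n := by
  induction n with
  | zero => rfl
  | succ k ih => simp [ssum_succ, ih]; ring

theorem ssum_mul (a : ℤ) (f : ℕ → ℤ) (n : ℕ) :
    ssum (fun i => a * f i) n = a * ssum f n := by
  induction n with
  | zero => simp [ssum_zero]
  | succ k ih => simp [ssum_succ, ih]; ring

theorem ssum_const_zero (n : ℕ) : ssum (fun _ => (0 : ℤ)) n = 0 := by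
  induction n with
  | zero => rfl
  | succ k ih => simp [ssum_succ, ih]

theorem ssum_zero_fun {f : ℕ → ℤ} {n : ℕ} (h : ∀ i < n, f i = 0) : ssum f n = 0 := by
  rw [ssum_congr h]; exact ssum_const_zero n

-- one-dimensional shift: summing F(r + d) over range n equals summing F r over the rows whose
-- shifted-back index r - d is still in range (F vanishes outside [0, n))
theorem shift_neg (n : ℕ) (F : ℤ → ℤ) (h : F (-1) = 0) :
    ssum (fun r => F ((r : ℤ) - 1)) n = ssum (fun r => F (r : ℤ)) (n - 1) := by
  cases n with
  | zero => rfl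
  | succ k =>
    rw [ssum_succ']
    simp only [Nat.add_sub_cancel]
    rw [show ((0 : ℕ) : ℤ) - 1 = -1 by norm_num, h, zero_add]
    exact ssum_congr (fun i _ => by push_cast; ring_nf)

theorem cond_neg (n : ℕ) (F : ℤ → ℤ) :
    ssum (fun r => if 0 ≤ (r : ℤ) + 1 ∧ (r : ℤ) + 1 < (n : ℤ) then F (r : ℤ) else 0) n
      = ssum (fun r => F (r : ℤ)) (n - 1) := by
  cases n with
  | zero => rfl
  | succ k =>
    rw [ssum_succ]
    simp only [Nat.add_sub_cancel]
    rw [if_neg (by push_cast; omega), add_zero]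
    exact ssum_congr (fun i hi => by rw [if_pos (by push_cast; omega)])

theorem shift_pos (n : ℕ) (F : ℤ → ℤ) (h : F (n : ℤ) = 0) :
    ssum (fun r => F ((r : ℤ) + 1)) n = ssum (fun r => F (r : ℤ)) n - F 0 := by
  cases n with
  | zero => rw [ssum_zero, ssum_zero, show F 0 = 0 by exact_mod_cast h]; ring
  | succ k =>
    rw [ssum_succ, ssum_succ' (fun r => F (r : ℤ))]
    rw [show ((k : ℤ) + 1) = ((k + 1 : ℕ) : ℤ) by push_cast; ring, h]
    have : ssum (fun i => F ((i : ℤ) + 1)) k = ssum (fun i => F ((i + 1 : ℕ) : ℤ)) k :=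
      ssum_congr (fun i _ => by push_cast; ring_nf)
    rw [this]
    push_cast
    ring

theorem cond_pos (n : ℕ) (F : ℤ → ℤ) (h : F (n : ℤ) = 0) :
    ssum (fun r => if 0 ≤ (r : ℤ) - 1 ∧ (r : ℤ) - 1 < (n : ℤ) then F (r : ℤ) else 0) n
      = ssum (fun r => F (r : ℤ)) n - F 0 := by
  cases n with
  | zero => rw [ssum_zero, ssum_zero, show F 0 = 0 by exact_mod_cast h]; ring
  | succ k =>
    rw [ssum_succ', ssum_succ' (fun r => F (r : ℤ))]
    have hneg : ¬(0 ≤ ((0 : ℕ) : ℤ) - 1 ∧ ((0 : ℕ) : ℤ) - 1 < ((k + 1 : ℕ) : ℤ)) := by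
      omega
    rw [if_neg hneg, zero_add]
    have : ssum (fun i => if 0 ≤ ((i + 1 : ℕ) : ℤ) - 1 ∧ ((i + 1 : ℕ) : ℤ) - 1 < ((k + 1 : ℕ) : ℤ)
        then F ((i + 1 : ℕ) : ℤ) else 0) k = ssum (fun i => F ((i + 1 : ℕ) : ℤ)) k :=
      ssum_congr (fun i hi => by rw [if_pos (by push_cast; omega)])
    rw [this]
    push_cast
    ring

theorem axis (n : ℕ) (d : ℤ) (hd : d = -1 ∨ d = 0 ∨ d = 1) (F : ℤ → ℤ)
    (hs : ∀ x : ℤ, x < 0 ∨ (n : ℤ) ≤ x → F x = 0) :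
    ssum (fun r => F ((r : ℤ) + d)) n
      = ssum (fun r => if 0 ≤ (r : ℤ) - d ∧ (r : ℤ) - d < (n : ℤ) then F (r : ℤ) else 0) n := by
  rcases hd with rfl | rfl | rfl
  · have l : ssum (fun r => F ((r : ℤ) + (-1))) n = ssum (fun r => F (r : ℤ)) (n - 1) := by
      rw [← shift_neg n F (hs (-1) (Or.inl (by norm_num)))]
      exact ssum_congr (fun i _ => by ring_nf)
    have r : ssum (fun r => if 0 ≤ (r : ℤ) - (-1) ∧ (r : ℤ) - (-1) < (n : ℤ) then F (r : ℤ) else 0) n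
        = ssum (fun r => F (r : ℤ)) (n - 1) := by
      rw [← cond_neg n F]
      exact ssum_congr (fun i _ => by norm_num)
    rw [l, r]
  · exact ssum_congr (fun i hi => by
      rw [add_zero, sub_zero, if_pos ⟨by positivity, by exact_mod_cast hi⟩])
  · have hFn : F (n : ℤ) = 0 := hs _ (Or.inr le_rfl)
    rw [shift_pos n F hFn, ← cond_pos n F hFn]

-- the two-dimensional shift, both axes at once, with indicator factors
theorem two_axis (grid : List (List Int)) (dr dc : ℤ)
    (hdr : dr = -1 ∨ dr = 0 ∨ dr = 1) (hdc : dc = -1 ∨ dc = 0 ∨ dc = 1) :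
    ssum (fun r => ssum (fun c => pvF grid ((r : ℤ) + dr) ((c : ℤ) + dc)) (grid.headD []).length) grid.length
      = ssum (fun r => ssum (fun c =>
          (if 0 ≤ (r : ℤ) - dr ∧ (r : ℤ) - dr < (grid.length : ℤ) then (1 : ℤ) else 0) *
          ((if 0 ≤ (c : ℤ) - dc ∧ (c : ℤ) - dc < ((grid.headD []).length : ℤ) then (1 : ℤ) else 0) *
            pvF grid (r : ℤ) (c : ℤ))) (grid.headD []).length) grid.length := by
  have hsupp : ∀ x y : ℤ,
      x < 0 ∨ (grid.length : ℤ) ≤ x ∨ y < 0 ∨ ((grid.headD []).length : ℤ) ≤ y →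
      pvF grid x y = 0 := by
    intro x y h
    unfold pvF
    split_ifs with hc
    · omega
    · rfl
  have step1 : ssum (fun r => ssum (fun c => pvF grid ((r : ℤ) + dr) ((c : ℤ) + dc))
      (grid.headD []).length) grid.length
      = ssum (fun r => ssum (fun c =>
          if 0 ≤ (c : ℤ) - dc ∧ (c : ℤ) - dc < ((grid.headD []).length : ℤ) then
            pvF grid ((r : ℤ) + dr) (c : ℤ) else 0) (grid.headD []).length) grid.length :=
    ssum_congr (fun r _ =>
      axis (grid.headD []).length dc hdc (pvF grid ((r : ℤ) + dr))
        (fun y hy => hsupp _ y (by tauto)))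
  have step2 : ssum (fun r => ssum (fun c =>
        if 0 ≤ (c : ℤ) - dc ∧ (c : ℤ) - dc < ((grid.headD []).length : ℤ) then
          pvF grid ((r : ℤ) + dr) (c : ℤ) else 0) (grid.headD []).length) grid.length
      = ssum (fun r =>
          if 0 ≤ (r : ℤ) - dr ∧ (r : ℤ) - dr < (grid.length : ℤ) then
            ssum (fun c => if 0 ≤ (c : ℤ) - dc ∧ (c : ℤ) - dc < ((grid.headD []).length : ℤ) then
              pvF grid (r : ℤ) (c : ℤ) else 0) (grid.headD []).length
          else 0) grid.length :=
    axis grid.length dr hdr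
      (fun x => ssum (fun c =>
        if 0 ≤ (c : ℤ) - dc ∧ (c : ℤ) - dc < ((grid.headD []).length : ℤ) then
          pvF grid x (c : ℤ) else 0) (grid.headD []).length)
      (fun x hx => ssum_zero_fun (fun c _ => by
        rw [hsupp x (c : ℤ) (by tauto)]
        simp))
  rw [step1, step2]
  refine ssum_congr (fun r hr => ?_)
  by_cases hcr : 0 ≤ (r : ℤ) - dr ∧ (r : ℤ) - dr < (grid.length : ℤ)
  · rw [if_pos hcr]
    refine ssum_congr (fun c hc => ?_)
    rw [if_pos hcr]
    split_ifs <;> ring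
  · rw [if_neg hcr]
    refine (ssum_zero_fun (fun c hc => ?_)).symm
    rw [if_neg hcr]
    ring


theorem getD_zero_headD (grid : List (List Int)) :
    PySem.List.pyGetD grid 0 [] = grid.headD [] := by
  cases grid <;> simp [PySem.List.pyGetD_zero]

theorem cell_eq (grid : List (List Int)) (hpre : Pre_path_number grid) (x y : ℤ) :
    (if 0 ≤ x ∧ x < (grid.length : ℤ) ∧ 0 ≤ y ∧ y < ((grid.headD []).length : ℤ) then
       PySem.List.pyGetD (PySem.List.pyGetD grid x []) y 0 else 0) = pvF grid x y := by
  unfold pvF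
  split_ifs with h
  · obtain ⟨hx0, hxn, hy0, hym⟩ := h
    have hxn' : x.toNat < grid.length := by omega
    rw [PySem.List.pyGetD_eq_getElem grid [] hx0 hxn]
    have hrow : ((grid.headD []).length : ℤ) ≤ ((grid[x.toNat]).length : ℤ) := by
      exact_mod_cast hpre.2 _ (List.getElem_mem hxn')
    rw [PySem.List.pyGetD_eq_getElem _ 0 hy0 (by omega)]
    rw [List.getD_eq_getElem grid [] hxn', List.getD_eq_getElem _ 0 (by omega)]
  · rfl

theorem if_append (c : Prop) [Decidable c] (xs : List ℤ) (v : ℤ) :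
    (if c then xs ++ [v] else xs ++ [0]) = xs ++ [if c then v else 0] := by
  split_ifs <;> rfl

theorem nine_sum (b0 b1 b2 b3 b4 b5 b6 b7 b8 : ℤ) :
    ((PySem.List.enumerate [b0, b1, b2, b3, b4, b5, b6, b7, b8] 0).map
      (fun ib => ib.2 <<< (8 - ib.1).toNat)).sum
      = 256 * b0 + (128 * b1 + (64 * b2 + (32 * b3 + (16 * b4 + (8 * b5 +
          (4 * b6 + (2 * b7 + 1 * b8))))))) := by
  norm_num [PySem.List.enumerate_cons, PySem.List.enumerate_nil, Int.shiftLeft_eq',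
    show Int.toNat 8 = 8 from rfl, show Int.toNat 7 = 7 from rfl,
    show Int.toNat 6 = 6 from rfl, show Int.toNat 5 = 5 from rfl,
    show Int.toNat 4 = 4 from rfl, show Int.toNat 3 = 3 from rfl,
    show Int.toNat 2 = 2 from rfl]
  ring

theorem sum_map_pyRange (n : ℕ) (G : ℤ → ℤ) :
    ((PySem.List.pyRange 0 (n : ℤ) 1).map G).sum = ssum (fun k => G (k : ℤ)) n := by
  rw [show PySem.List.pyRange 0 (n : ℤ) 1 = PySem.List.pyRange 0 (n : ℤ) from rfl,
    PySem.List.pyRange_one, List.map_map]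
  unfold ssum
  simp only [sub_zero, Int.toNat_natCast]
  exact congrArg List.sum (List.map_congr_left (fun i _ => by simp))

theorem cellB (grid : List (List Int)) (hpre : Pre_path_number grid) (r c : ℕ)
    (hr : r < grid.length) (hc : c < (grid.headD []).length) :
    (List.take (grid.headD []).length (grid.getD r [])).getD c 0 = pvF grid (r : ℤ) (c : ℤ) := by
  have hrowmem : grid.getD r [] ∈ grid := by
    rw [List.getD_eq_getElem grid [] hr]; exact List.getElem_mem hr
  have hlen : (grid.headD []).length ≤ (grid.getD r []).length := hpre.2 _ hrowmem
  unfold pvF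
  rw [if_pos ⟨by positivity, by exact_mod_cast hr, by positivity, by exact_mod_cast hc⟩]
  simp only [Int.toNat_natCast]
  rw [List.getD_eq_getElem _ 0 (by rw [List.length_take]; omega),
    List.getD_eq_getElem _ 0 (by omega), List.getElem_take]

-- an edge weight is the sum of the three one-axis indicator contributions
theorem edge_expand (n : ℕ) (x : ℤ) (hi mid lo : ℤ) (hx0 : 0 ≤ x) (hxn : x < (n : ℤ)) :
    edgeWeight x (n : ℤ) hi mid lo
      = hi * (if 0 ≤ x - (-1) ∧ x - (-1) < (n : ℤ) then 1 else 0)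
        + mid * (if 0 ≤ x - 0 ∧ x - 0 < (n : ℤ) then 1 else 0)
        + lo * (if 0 ≤ x - 1 ∧ x - 1 < (n : ℤ) then 1 else 0) := by
  unfold edgeWeight
  have e1 : (if 0 ≤ x - (-1) ∧ x - (-1) < (n:ℤ) then (1:ℤ) else 0)
      = (if x < (n:ℤ) - 1 then 1 else 0) := by
    split_ifs <;> first | rfl | (exfalso; omega)
  have e2 : (if 0 ≤ x - 0 ∧ x - 0 < (n:ℤ) then (1:ℤ) else 0) = 1 := if_pos (by omega)
  have e3 : (if 0 ≤ x - 1 ∧ x - 1 < (n:ℤ) then (1:ℤ) else 0)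
      = (if 0 < x then 1 else 0) := by
    split_ifs <;> first | rfl | (exfalso; omega)
  rw [e1, e2, e3]
  split_ifs <;> ring

theorem dd_add (n m : ℕ) (f g : ℕ → ℕ → ℤ) :
    ssum (fun r => ssum (fun c => f r c + g r c) m) n
      = ssum (fun r => ssum (fun c => f r c) m) n
        + ssum (fun r => ssum (fun c => g r c) m) n := by
  rw [ssum_congr (fun r _ => ssum_add (f r) (g r) m)]
  exact ssum_add _ _ n

theorem dd_mul (n m : ℕ) (a : ℤ) (f : ℕ → ℕ → ℤ) :
    ssum (fun r => ssum (fun c => a * f r c) m) n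
      = a * ssum (fun r => ssum (fun c => f r c) m) n := by
  rw [ssum_congr (fun r _ => ssum_mul a (f r) m)]
  exact ssum_mul a _ n

-- A's port as a clean double sum of the 9 weighted shifted reads
theorem A_norm (grid : List (List Int)) (hpre : Pre_path_number grid) :
    path_number grid
      = ssum (fun r => ssum (fun c =>
          256 * pvF grid ((r : ℤ) + (-1)) ((c : ℤ) + (-1)) +
          (128 * pvF grid ((r : ℤ) + (-1)) ((c : ℤ) + 0) +
          (64 * pvF grid ((r : ℤ) + (-1)) ((c : ℤ) + 1) +
          (32 * pvF grid ((r : ℤ) + 0) ((c : ℤ) + (-1)) +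
          (16 * pvF grid ((r : ℤ) + 0) ((c : ℤ) + 0) +
          (8 * pvF grid ((r : ℤ) + 0) ((c : ℤ) + 1) +
          (4 * pvF grid ((r : ℤ) + 1) ((c : ℤ) + (-1)) +
          (2 * pvF grid ((r : ℤ) + 1) ((c : ℤ) + 0) +
          1 * pvF grid ((r : ℤ) + 1) ((c : ℤ) + 1)))))))))
          (grid.headD []).length) grid.length := by
  unfold path_number
  simp only [getD_zero_headD, PySem.List.len_eq, List.foldl_cons, List.foldl_nil,
    if_append, List.nil_append, List.cons_append,
    cell_eq grid hpre, nine_sum, PySem.List.foldl_add, zero_add, sum_map_pyRange]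

-- B's port as the same kind of double sum, per-cell weight product
theorem B_norm (grid : List (List Int)) (hpre : Pre_path_number grid) :
    path_number_alt grid
      = ssum (fun r => ssum (fun c =>
          pvF grid (r : ℤ) (c : ℤ) *
            edgeWeight (r : ℤ) (grid.length : ℤ) 64 8 1 *
            edgeWeight (c : ℤ) ((grid.headD []).length : ℤ) 4 2 1)
          (grid.headD []).length) grid.length := by
  unfold path_number_alt
  simp only [getD_zero_headD, PySem.List.len_eq]
  rw [PySem.List.enumerate_eq_map_pyRange grid [], List.map_map]
  simp only [PySem.List.len_eq]
  rw [sum_map_pyRange]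
  refine ssum_congr (fun r hr => ?_)
  simp only [Function.comp_apply, PySem.List.pyGetD_natCast, PySem.List.slice_to_natCast]
  rw [PySem.List.enumerate_eq_map_pyRange _ (0 : ℤ), List.map_map]
  simp only [PySem.List.len_eq]
  have hrowmem : grid.getD r [] ∈ grid := by
    rw [List.getD_eq_getElem grid [] hr]; exact List.getElem_mem hr
  have hlen : (List.take (grid.headD []).length (grid.getD r [])).length
      = (grid.headD []).length := by
    rw [List.length_take]
    exact Nat.min_eq_left (hpre.2 _ hrowmem)
  rw [hlen, sum_map_pyRange]
  refine ssum_congr (fun c hc => ?_)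
  simp only [Function.comp_apply, PySem.List.pyGetD_natCast]
  rw [cellB grid hpre r c hr hc]

-- ===== VERDICT (by name: the statement is the Claim_ definition above) =====
theorem path_number_spec : Claim_equal_path_number := by
  intro grid _ hpre
  unfold Spec_path_number
  rw [A_norm grid hpre, B_norm grid hpre]
  have hcell : ∀ r c : ℕ, r < grid.length → c < (grid.headD []).length →
      pvF grid (r : ℤ) (c : ℤ) *
        edgeWeight (r : ℤ) (grid.length : ℤ) 64 8 1 *
        edgeWeight (c : ℤ) ((grid.headD []).length : ℤ) 4 2 1
      = 256 * ((if 0 ≤ (r : ℤ) - (-1) ∧ (r : ℤ) - (-1) < (grid.length : ℤ) then (1:ℤ) else 0) *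
          ((if 0 ≤ (c : ℤ) - (-1) ∧ (c : ℤ) - (-1) < ((grid.headD []).length : ℤ) then (1:ℤ) else 0) *
            pvF grid (r : ℤ) (c : ℤ))) +
        (128 * ((if 0 ≤ (r : ℤ) - (-1) ∧ (r : ℤ) - (-1) < (grid.length : ℤ) then (1:ℤ) else 0) *
          ((if 0 ≤ (c : ℤ) - 0 ∧ (c : ℤ) - 0 < ((grid.headD []).length : ℤ) then (1:ℤ) else 0) *
            pvF grid (r : ℤ) (c : ℤ))) +
        (64 * ((if 0 ≤ (r : ℤ) - (-1) ∧ (r : ℤ) - (-1) < (grid.length : ℤ) then (1:ℤ) else 0) *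
          ((if 0 ≤ (c : ℤ) - 1 ∧ (c : ℤ) - 1 < ((grid.headD []).length : ℤ) then (1:ℤ) else 0) *
            pvF grid (r : ℤ) (c : ℤ))) +
        (32 * ((if 0 ≤ (r : ℤ) - 0 ∧ (r : ℤ) - 0 < (grid.length : ℤ) then (1:ℤ) else 0) *
          ((if 0 ≤ (c : ℤ) - (-1) ∧ (c : ℤ) - (-1) < ((grid.headD []).length : ℤ) then (1:ℤ) else 0) *
            pvF grid (r : ℤ) (c : ℤ))) +
        (16 * ((if 0 ≤ (r : ℤ) - 0 ∧ (r : ℤ) - 0 < (grid.length : ℤ) then (1:ℤ) else 0) *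
          ((if 0 ≤ (c : ℤ) - 0 ∧ (c : ℤ) - 0 < ((grid.headD []).length : ℤ) then (1:ℤ) else 0) *
            pvF grid (r : ℤ) (c : ℤ))) +
        (8 * ((if 0 ≤ (r : ℤ) - 0 ∧ (r : ℤ) - 0 < (grid.length : ℤ) then (1:ℤ) else 0) *
          ((if 0 ≤ (c : ℤ) - 1 ∧ (c : ℤ) - 1 < ((grid.headD []).length : ℤ) then (1:ℤ) else 0) *
            pvF grid (r : ℤ) (c : ℤ))) +
        (4 * ((if 0 ≤ (r : ℤ) - 1 ∧ (r : ℤ) - 1 < (grid.length : ℤ) then (1:ℤ) else 0) *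
          ((if 0 ≤ (c : ℤ) - (-1) ∧ (c : ℤ) - (-1) < ((grid.headD []).length : ℤ) then (1:ℤ) else 0) *
            pvF grid (r : ℤ) (c : ℤ))) +
        (2 * ((if 0 ≤ (r : ℤ) - 1 ∧ (r : ℤ) - 1 < (grid.length : ℤ) then (1:ℤ) else 0) *
          ((if 0 ≤ (c : ℤ) - 0 ∧ (c : ℤ) - 0 < ((grid.headD []).length : ℤ) then (1:ℤ) else 0) *
            pvF grid (r : ℤ) (c : ℤ))) +
        1 * ((if 0 ≤ (r : ℤ) - 1 ∧ (r : ℤ) - 1 < (grid.length : ℤ) then (1:ℤ) else 0) *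
          ((if 0 ≤ (c : ℤ) - 1 ∧ (c : ℤ) - 1 < ((grid.headD []).length : ℤ) then (1:ℤ) else 0) *
            pvF grid (r : ℤ) (c : ℤ)))))))))) := by
    intro r c hr hc
    rw [edge_expand grid.length (r : ℤ) 64 8 1 (by positivity) (by exact_mod_cast hr),
      edge_expand (grid.headD []).length (c : ℤ) 4 2 1 (by positivity) (by exact_mod_cast hc)]
    ring
  rw [ssum_congr (fun r hr => ssum_congr (fun c hc => hcell r c hr hc))]
  simp only [dd_add, dd_mul]
  rw [two_axis grid (-1) (-1) (by norm_num) (by norm_num),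
    two_axis grid (-1) 0 (by norm_num) (by norm_num),
    two_axis grid (-1) 1 (by norm_num) (by norm_num),
    two_axis grid 0 (-1) (by norm_num) (by norm_num),
    two_axis grid 0 0 (by norm_num) (by norm_num),
    two_axis grid 0 1 (by norm_num) (by norm_num),
    two_axis grid 1 (-1) (by norm_num) (by norm_num),
    two_axis grid 1 0 (by norm_num) (by norm_num),
    two_axis grid 1 1 (by norm_num) (by norm_num)]
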